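-- pv_equiv track=rewrite | github.com/BrettDutka/Python-Programs-Projects | Recursion/recursion.py | secdec_dec
-- ===== SOURCE A (Python) =====
-- def secdec_dec(n):
--     d = 0
--     b = 17
--     for i in n:
--         if i.isnumeric():
--             i = int(i)
--         else:
--             i = ord(i) - ord("A") + 10
--         d = d * b + i
--     return d
-- ===== SOURCE B (Python) =====
-- def _digit_val(i):
--     if i.isnumeric():
--         return int(i)
--     return ord(i) - ord("A") + 10
--
-- def secdec_dec(n):
--     value = 0
--     power = 1
--     for c in reversed(n):
--         value += _digit_val(c) * power
--         power *= 17
--     return value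
-- ===== Notes on version B (the rewrite author's own statement) =====
-- stated objective: alternative
-- what changed: Replaced Horner's left-to-right accumulation d = d*17 + digit with a positional-weight expansion over the reversed string, maintaining an explicit power-of-17 variable and summing digit*power.
import Mathlib
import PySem

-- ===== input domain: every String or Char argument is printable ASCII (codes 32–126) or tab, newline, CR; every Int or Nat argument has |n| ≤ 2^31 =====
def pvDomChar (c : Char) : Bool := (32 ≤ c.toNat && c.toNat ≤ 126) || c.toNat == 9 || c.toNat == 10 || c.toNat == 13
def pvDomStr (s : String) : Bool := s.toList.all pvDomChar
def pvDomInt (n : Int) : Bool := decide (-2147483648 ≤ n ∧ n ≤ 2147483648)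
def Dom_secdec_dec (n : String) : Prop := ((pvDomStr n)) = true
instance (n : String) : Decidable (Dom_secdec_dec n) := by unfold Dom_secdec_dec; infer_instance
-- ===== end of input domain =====

-- B replaces Horner's method with a positional-weight sum over the reversed string (alternative decomposition, same cost).


-- ===== PORT A =====
-- A: Horner's method, d = d*17 + digit, left to right.
-- i.isnumeric() → Char.isDigit and int(i) → toNat - 48: exact for single printable-ASCII chars.
def secdec_dec (n : String) : Int :=
  (n.toList.foldl (fun d i =>
    d * 17 + (if i.isDigit then ((i.toNat : Int) - 48) else (i.toNat : Int) - 65 + 10)) 0)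

-- ===== PORT B =====
-- same digit rule as Source B's _digit_val (exact on printable ASCII)
def pvDigitVal (i : Char) : Int :=
  if i.isDigit then ((i.toNat : Int) - 48) else (i.toNat : Int) - 65 + 10

-- B: fold over the reversed string carrying (value, power), value += digit*power; power *= 17.
def secdec_dec_alt (n : String) : Int :=
  (n.toList.reverse.foldl (fun (s : Int × Int) c => (s.1 + pvDigitVal c * s.2, s.2 * 17)) (0, 1)).1

-- ===== PRECONDITION & SPEC =====
def Spec_secdec_dec (n : String) (out : Int) : Prop := out = secdec_dec_alt n
instance (n : String) (out : Int) : Decidable (Spec_secdec_dec n out) := by unfold Spec_secdec_dec; infer_instance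

-- ===== CLAIM (what is proved, stated in full; the proofs are below) =====
def Claim_equal_secdec_dec : Prop := ∀ (n : String), Dom_secdec_dec n → Spec_secdec_dec n (secdec_dec n)

-- ===== LEMMAS AND PROOFS =====
def pvStepB (s : Int × Int) (c : Char) : Int × Int := (s.1 + pvDigitVal c * s.2, s.2 * 17)

theorem pvStepB_eq : (fun (s : Int × Int) c => (s.1 + pvDigitVal c * s.2, s.2 * 17)) = pvStepB := rfl

theorem pvB_snd (l : List Char) (v p : Int) :
    (l.foldl pvStepB (v, p)).2 = p * 17 ^ l.length := by
  induction l generalizing v p with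
  | nil => simp
  | cons c t ih => simp [List.foldl, pvStepB, ih, pow_succ]; ring

theorem pvA_B (l : List Char) (d : Int) :
    l.foldl (fun d i =>
      d * 17 + (if i.isDigit then ((i.toNat : Int) - 48) else (i.toNat : Int) - 65 + 10)) d
    = d * 17 ^ l.length + (l.reverse.foldl pvStepB (0, 1)).1 := by
  induction l generalizing d with
  | nil => simp
  | cons c t ih =>
    have h1 : (c :: t).reverse = t.reverse ++ [c] := by simp
    rw [List.foldl, ih, h1, List.foldl_append]
    have h2 := pvB_snd t.reverse 0 1
    rcases hs : t.reverse.foldl pvStepB (0, 1) with ⟨v, p⟩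
    rw [hs] at h2
    have hp : p = 17 ^ t.length := by simpa using h2
    simp only [List.foldl, pvStepB, hp, pvDigitVal, List.length_cons, pow_succ]
    split_ifs <;> ring

-- ===== VERDICT (by name: the statement is the Claim_ definition above) =====
theorem secdec_dec_spec : Claim_equal_secdec_dec := by
  intro n _
  unfold Spec_secdec_dec secdec_dec secdec_dec_alt
  rw [pvStepB_eq, pvA_B]
  simp
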